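-- pv_equiv track=rewrite | github.com/GenryEden/kpolyakovName | 2100.py | convert
-- ===== SOURCE A (Python) =====
-- def convert(s):
-- 	s = ''.join(s)
-- 	while '11' in s:
-- 		if '112' in s:
-- 			s = s.replace('112', '5', 1)
-- 		else:
-- 			s = s.replace('11', '7', 1)
-- 	return s
-- ===== SOURCE B (Python) =====
-- def convert(s):
--     s = ''.join(s)
--     out = []
--     run = 0
--     for c in s:
--         if c == '1':
--             run += 1
--         elif c == '2' and run >= 2:
--             out.append('7' * ((run - 2) // 2))
--             if (run - 2) % 2:
--                 out.append('1')
--             out.append('5')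
--             run = 0
--         else:
--             out.append('7' * (run // 2))
--             if run % 2:
--                 out.append('1')
--             out.append(c)
--             run = 0
--     out.append('7' * (run // 2))
--     if run % 2:
--         out.append('1')
--     return ''.join(out)
-- ===== Notes on version B (the rewrite author's own statement) =====
-- stated objective: alternative
-- what changed: A repeatedly rescans the whole string ('in' + str.replace(...,1)) until no '11' remains; B makes one left-to-right pass tracking the current run of '1's, emitting '7' per pair, a '5' when a run of >=2 ones is followed by '2', and the odd leftover '1'.
import Mathlib
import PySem

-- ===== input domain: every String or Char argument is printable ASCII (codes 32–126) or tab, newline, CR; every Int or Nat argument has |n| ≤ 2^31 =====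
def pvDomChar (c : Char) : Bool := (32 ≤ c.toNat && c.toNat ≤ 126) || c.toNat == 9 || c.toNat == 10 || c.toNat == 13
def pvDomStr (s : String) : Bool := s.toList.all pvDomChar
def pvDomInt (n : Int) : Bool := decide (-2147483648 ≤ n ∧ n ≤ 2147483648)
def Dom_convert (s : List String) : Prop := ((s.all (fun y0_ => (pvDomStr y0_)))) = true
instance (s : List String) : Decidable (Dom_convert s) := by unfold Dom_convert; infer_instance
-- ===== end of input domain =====

-- B replaces A's replace-until-fixpoint rescanning loop by a single left-to-right pass over runs of '1's.

-- ===== PORT A =====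
-- hand port of Python's s.replace(pat, rep, 1): replace the FIRST (leftmost) occurrence only; exact
def pvRF (pat rep l : List Char) : List Char :=
  match l with
  | [] => []
  | c :: cs => if pat <+: (c :: cs) then rep ++ (c :: cs).drop pat.length else c :: pvRF pat rep cs

-- needed by pvLoopA's termination (cited in decreasing_by)
theorem pvRF_len_lt (pat rep : List Char) (hlt : rep.length < pat.length) :
    ∀ l : List Char, pat <:+: l → (pvRF pat rep l).length < l.length := by
  intro l
  induction l with
  | nil =>
      intro h
      rw [List.infix_nil] at h
      subst h; simp at hlt
  | cons c cs ih =>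
      intro h
      rw [pvRF]
      by_cases hp : pat <+: (c :: cs)
      · have hle := hp.length_le
        simp only [if_pos hp, List.length_append, List.length_drop]
        omega
      · rcases (List.infix_cons_iff.mp h) with h' | h'
        · exact absurd h' hp
        · simp only [if_neg hp, List.length_cons]
          have := ih h'
          omega

def pvLoopA (l : List Char) : List Char :=
  if h1 : PySem.Chars.isIn ['1','1'] l then
    if h2 : PySem.Chars.isIn ['1','1','2'] l then
      pvLoopA (pvRF ['1','1','2'] ['5'] l)
    else
      pvLoopA (pvRF ['1','1'] ['7'] l)
  else l
termination_by l.length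
decreasing_by
  · exact pvRF_len_lt _ _ (by decide) l ((PySem.Chars.isIn_iff_infix _ _).mp h2)
  · exact pvRF_len_lt _ _ (by decide) l ((PySem.Chars.isIn_iff_infix _ _).mp h1)

def convert (s : List String) : String :=
  String.ofList (pvLoopA (PySem.Str.join "" s).toList)

-- ===== PORT B =====
-- '7' * (run // 2) plus the optional odd '1' that B's flush emits
def pvPairs (run : Nat) : List Char :=
  List.replicate (run / 2) '7' ++ (if run % 2 = 1 then ['1'] else [])

-- B's single pass: run counts the current run of '1's, flushed at each non-'1' char
def pvGoB (run : Nat) (l : List Char) : List Char :=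
  match l with
  | [] => pvPairs run
  | c :: cs =>
      if c = '1' then pvGoB (run + 1) cs
      else if c = '2' ∧ 2 ≤ run then pvPairs (run - 2) ++ '5' :: pvGoB 0 cs
      else pvPairs run ++ c :: pvGoB 0 cs

def convert_alt (s : List String) : String :=
  String.ofList (pvGoB 0 (PySem.Str.join "" s).toList)

-- ===== PRECONDITION & SPEC =====
def Spec_convert (s : List String) (out : String) : Prop := out = convert_alt s
instance (s : List String) (out : String) : Decidable (Spec_convert s out) := by unfold Spec_convert; infer_instance

-- ===== CLAIM (what is proved, stated in full; the proofs are below) =====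
def Claim_equal_convert : Prop := ∀ (s : List String), Dom_convert s → Spec_convert s (convert s)

-- ===== LEMMAS AND PROOFS =====

theorem pvPairs_add_two (r : Nat) : pvPairs (r + 2) = '7' :: pvPairs r := by
  have h1 : (r + 2) / 2 = r / 2 + 1 := by omega
  have h2 : (r + 2) % 2 = r % 2 := by omega
  simp [pvPairs, h1, h2, List.replicate_succ]

-- congruence: pvGoB only looks at the tail through recursive calls
theorem pvGoB_cons_congr (c : Char) (x y : List Char)
    (h : ∀ r, pvGoB r x = pvGoB r y) : ∀ r, pvGoB r (c :: x) = pvGoB r (c :: y) := by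
  intro r
  rw [pvGoB, pvGoB]
  split_ifs with hc h2
  · exact h (r + 1)
  · rw [h 0]
  · rw [h 0]

-- replacing any occurrence of "112" by "5" does not change B's output
theorem pvGoB_rf112 : ∀ l : List Char, ['1','1','2'] <:+: l →
    ∀ r, pvGoB r (pvRF ['1','1','2'] ['5'] l) = pvGoB r l := by
  intro l
  induction l with
  | nil => intro h; rw [List.infix_nil] at h; simp at h
  | cons c cs ih =>
      intro h r
      rw [pvRF]
      by_cases hp : ['1','1','2'] <+: (c :: cs)
      · obtain ⟨t, ht⟩ := hp
        rw [if_pos ⟨t, ht⟩]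
        cases ht
        show pvGoB r ('5' :: t) = pvGoB r ('1' :: '1' :: '2' :: t)
        have L : pvGoB r ('5' :: t) = pvPairs r ++ '5' :: pvGoB 0 t := by simp [pvGoB]
        have R : pvGoB r ('1' :: '1' :: '2' :: t) = pvPairs r ++ '5' :: pvGoB 0 t := by
          rw [pvGoB, if_pos rfl, pvGoB, if_pos rfl, pvGoB, if_neg (by decide : ¬ ('2' = '1')),
            if_pos ⟨rfl, by omega⟩, show r + 1 + 1 - 2 = r from by omega]
        rw [L, R]
      · rw [if_neg hp]
        rcases List.infix_cons_iff.mp h with h' | h'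
        · exact absurd h' hp
        · exact pvGoB_cons_congr c _ cs (fun r' => ih h' r') r

-- t is a (possibly empty) run of '1's NOT followed by '2'
def pvN2 : List Char → Prop
  | [] => True
  | c :: cs => c ≠ '2' ∧ (c = '1' → pvN2 cs)

theorem pvN2_not : ∀ t : List Char, ¬ pvN2 t →
    ∃ m rest, t = List.replicate m '1' ++ '2' :: rest := by
  intro t
  induction t with
  | nil => intro h; exact absurd trivial h
  | cons c cs ih =>
      intro h
      by_cases hc : c = '2'
      · exact ⟨0, cs, by simp [hc]⟩
      · by_cases h1 : c = '1'
        · have hcs : ¬ pvN2 cs := by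
            intro hn2; exact h ⟨hc, fun _ => hn2⟩
          obtain ⟨m, rest, hrest⟩ := ih hcs
          exact ⟨m + 1, rest, by simp [h1, hrest, List.replicate_succ]⟩
        · exact absurd ⟨hc, fun h' => absurd h' h1⟩ h

theorem pvInfix112_run (m : Nat) (rest : List Char) :
    ['1','1','2'] <:+: ('1' :: '1' :: (List.replicate m '1' ++ '2' :: rest)) := by
  refine ⟨List.replicate m '1', rest, ?_⟩
  induction m with
  | zero => simp
  | succ n ihn => simpa [List.replicate_succ, List.cons_append] using congrArg (List.cons '1') ihn

-- two more pending '1's ahead of a run not followed by '2' emit one '7'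
theorem pvGoB_shift : ∀ t : List Char, pvN2 t → ∀ r, pvGoB (r + 2) t = '7' :: pvGoB r t := by
  intro t
  induction t with
  | nil => intro _ r; show pvPairs (r + 2) = '7' :: pvPairs r; exact pvPairs_add_two r
  | cons c cs ih =>
      intro h r
      obtain ⟨hc2, hc1⟩ := h
      rw [pvGoB, pvGoB]
      by_cases h1 : c = '1'
      · rw [if_pos h1, if_pos h1]
        have : r + 2 + 1 = r + 1 + 2 := by omega
        rw [this]
        exact ih (hc1 h1) (r + 1)
      · rw [if_neg h1, if_neg h1,
          if_neg (fun hh => hc2 hh.1), if_neg (fun hh => hc2 hh.1), pvPairs_add_two]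
        simp

-- replacing the LEFTMOST occurrence of "11" by "7", when no "112" occurs, keeps B's output
theorem pvGoB_rf11 : ∀ l : List Char, ['1','1'] <:+: l → ¬ ['1','1','2'] <:+: l →
    ∀ r, (r = 0 ∨ l.head? ≠ some '1') →
      pvGoB r (pvRF ['1','1'] ['7'] l) = pvGoB r l := by
  intro l
  induction l with
  | nil => intro h; rw [List.infix_nil] at h; simp at h
  | cons c cs ih =>
      intro h h112 r hr
      rw [pvRF]
      by_cases hp : ['1','1'] <+: (c :: cs)
      · obtain ⟨t, ht⟩ := hp
        rw [if_pos ⟨t, ht⟩]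
        cases ht
        have hr0 : r = 0 := by
          rcases hr with h0 | hne
          · exact h0
          · exact ((by simp at hne : False)).elim
        subst hr0
        have hn2 : pvN2 t := by
          by_contra hn
          obtain ⟨m, rest, hrest⟩ := pvN2_not t hn
          exact h112 (hrest ▸ pvInfix112_run m rest)
        show pvGoB 0 ('7' :: t) = pvGoB 0 ('1' :: '1' :: t)
        have R : pvGoB 0 ('1' :: '1' :: t) = pvGoB 2 t := by
          rw [pvGoB, if_pos rfl, pvGoB, if_pos rfl]
        have L : pvGoB 0 ('7' :: t) = pvPairs 0 ++ '7' :: pvGoB 0 t := by simp [pvGoB]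
        rw [L, R, show (2 : Nat) = 0 + 2 from rfl, pvGoB_shift t hn2 0]
        simp [pvPairs]
      · rw [if_neg hp]
        have h' : ['1','1'] <:+: cs := by
          rcases List.infix_cons_iff.mp h with h' | h'
          · exact absurd h' hp
          · exact h'
        have h112' : ¬ ['1','1','2'] <:+: cs := fun hh => h112 (List.infix_cons hh)
        rw [pvGoB, pvGoB]
        by_cases h1 : c = '1'
        · rw [if_pos h1, if_pos h1]
          have hcs : cs.head? ≠ some '1' := by
            intro hh
            cases cs with
            | nil => simp at hh
            | cons c2 cs2 =>
                simp at hh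
                exact hp ⟨cs2, by simp [h1, hh]⟩
          exact ih h' h112' (r + 1) (Or.inr hcs)
        · rw [if_neg h1, if_neg h1]
          split_ifs with h2
          · rw [ih h' h112' 0 (Or.inl rfl)]
          · rw [ih h' h112' 0 (Or.inl rfl)]

-- a string with no "11" is already B-normal
theorem pvGoB_id : ∀ l : List Char, ¬ ['1','1'] <:+: l →
    pvGoB 0 l = l ∧ (l.head? ≠ some '1' → pvGoB 1 l = '1' :: l) := by
  intro l
  induction l with
  | nil => intro _; constructor
           · show pvPairs 0 = []; rfl
           · intro _; show pvPairs 1 = ['1']; rfl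
  | cons c cs ih =>
      intro h
      have hcs : ¬ ['1','1'] <:+: cs := fun hh => h (List.infix_cons hh)
      obtain ⟨ih1, ih2⟩ := ih hcs
      constructor
      · rw [pvGoB]
        by_cases h1 : c = '1'
        · rw [if_pos h1]
          have hhd : cs.head? ≠ some '1' := by
            intro hh
            cases cs with
            | nil => simp at hh
            | cons c2 cs2 =>
                simp at hh
                exact h (List.IsPrefix.isInfix ⟨cs2, by simp [h1, hh]⟩)
          rw [ih2 hhd, h1]
        · rw [if_neg h1, if_neg (by simp : ¬ (c = '2' ∧ 2 ≤ 0))]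
          rw [ih1]; rfl
      · intro hhd
        have h1 : c ≠ '1' := by simpa using hhd
        rw [pvGoB, if_neg h1, if_neg (by rintro ⟨_, hh⟩; omega : ¬ (c = '2' ∧ 2 ≤ 1))]
        rw [ih1]; rfl

-- A's loop computes B's single pass
theorem pvLoopA_eq_pvGoB : ∀ l : List Char, pvLoopA l = pvGoB 0 l := by
  intro l
  induction hn : l.length using Nat.strong_induction_on generalizing l with
  | _ n ih =>
  subst hn
  rw [pvLoopA]
  by_cases h1 : PySem.Chars.isIn ['1','1'] l = true
  · rw [dif_pos h1]
    have h1' := (PySem.Chars.isIn_iff_infix _ _).mp h1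
    by_cases h2 : PySem.Chars.isIn ['1','1','2'] l = true
    · have h2' := (PySem.Chars.isIn_iff_infix _ _).mp h2
      rw [dif_pos h2,
        ih _ (pvRF_len_lt _ _ (by decide) l h2') _ rfl,
        pvGoB_rf112 l h2' 0]
    · have h2' := (PySem.Chars.isIn_eq_false_iff _ _).mp (by simpa using h2)
      rw [dif_neg h2,
        ih _ (pvRF_len_lt _ _ (by decide) l h1') _ rfl,
        pvGoB_rf11 l h1' h2' 0 (Or.inl rfl)]
  · rw [dif_neg h1]
    have h1' := (PySem.Chars.isIn_eq_false_iff _ _).mp (by simpa using h1)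
    exact ((pvGoB_id l h1').1).symm

-- ===== VERDICT (by name: the statement is the Claim_ definition above) =====
theorem convert_spec : Claim_equal_convert := by
  intro s _
  unfold Spec_convert convert convert_alt
  rw [pvLoopA_eq_pvGoB]
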